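-- pv_equiv track=rewrite | github.com/jennmohr/basketballProject | backend/basketball/views.py | split_array_by_shotclock
-- ===== SOURCE A (Python) =====
-- def split_array_by_shotclock(json_array):
--     result = []
--     current_subarray = []
--
--     for i, obj in enumerate(json_array):
--         if i > 0 and obj.get('shotClock', 0) > json_array[i - 1].get('shotClock', 0):
--             if current_subarray:
--                 result.append(current_subarray)
--             current_subarray = []
--
--         current_subarray.append(obj)
--
--     if current_subarray:
--         result.append(current_subarray)
--
--     return result
-- ===== SOURCE B (Python) =====
-- def split_array_by_shotclock(json_array):
--     # Two-pointer run extraction: scan each maximal non-increasing run and slice it out.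
--     def sc(o):
--         return o.get('shotClock', 0)
--     result = []
--     pos = 0
--     n = len(json_array)
--     while pos < n:
--         j = pos + 1
--         while j < n and sc(json_array[j]) <= sc(json_array[j - 1]):
--             j += 1
--         result.append(json_array[pos:j])
--         pos = j
--     return result
-- ===== Notes on version B (the rewrite author's own statement) =====
-- stated objective: alternative
-- what changed: Replaced the per-element accumulator loop with conditional flushes by a two-pointer scan that finds each maximal non-increasing run and emits it as a slice.
import Mathlib
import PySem

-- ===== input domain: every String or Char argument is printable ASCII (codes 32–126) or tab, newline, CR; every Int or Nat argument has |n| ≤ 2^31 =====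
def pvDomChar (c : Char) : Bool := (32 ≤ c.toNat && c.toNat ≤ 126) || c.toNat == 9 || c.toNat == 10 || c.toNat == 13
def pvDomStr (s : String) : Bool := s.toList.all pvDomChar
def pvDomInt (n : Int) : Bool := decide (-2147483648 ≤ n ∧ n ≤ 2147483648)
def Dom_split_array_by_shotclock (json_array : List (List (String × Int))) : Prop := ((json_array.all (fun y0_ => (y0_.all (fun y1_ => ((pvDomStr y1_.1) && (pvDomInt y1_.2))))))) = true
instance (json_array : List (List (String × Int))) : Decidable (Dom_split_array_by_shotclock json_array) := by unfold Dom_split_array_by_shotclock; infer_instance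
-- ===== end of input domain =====

-- B replaces A's element-accumulator loop by a two-pointer scan that slices out each
-- maximal non-increasing run (objective: alternative decomposition, same cost).

-- ===== PORT A =====
-- obj.get('shotClock', 0): Python dict lookup with default (first match in the assoc list)
def pvSc (obj : List (String × Int)) : Int := (PySem.Dict.mk obj).getD "shotClock" 0

-- the 'for i, obj in enumerate(json_array)' loop: structural recursion carrying the
-- enumerate index i; state = (result, current_subarray); json_array[i-1] via pyGet?
-- (the index i-1 is always in range when the branch is reached, so .getD [] is exact)
def splitLoopA (ja : List (List (String × Int))) :
    Nat → List (List (String × Int)) →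
    List (List (List (String × Int))) × List (List (String × Int)) →
    List (List (List (String × Int))) × List (List (String × Int))
  | _, [], st => st
  | i, obj :: rest, (result, current) =>
      splitLoopA ja (i + 1) rest
        (if 0 < i ∧ pvSc obj > pvSc ((PySem.List.pyGet? ja ((i : Int) - 1)).getD []) then
           ((if current ≠ [] then result ++ [current] else result), [obj])
         else (result, current ++ [obj]))

def split_array_by_shotclock (json_array : List (List (String × Int))) : List (List (List (String × Int))) :=
  let st := splitLoopA json_array 0 json_array ([], [])
  if st.2 ≠ [] then st.1 ++ [st.2] else st.1

-- ===== PORT B =====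
-- the inner 'while j < n and sc(xs[j]) <= sc(xs[j-1]): j += 1' scan: length of the
-- non-increasing run continuing after prev (j - pos - 1 in Source B)
def pvRunLen : List (String × Int) → List (List (String × Int)) → Nat
  | _, [] => 0
  | prev, x :: xs => if pvSc x ≤ pvSc prev then 1 + pvRunLen x xs else 0

-- the outer 'while pos < n' loop of Source B: slice off one maximal run, continue after it
def split_array_by_shotclock_alt : List (List (String × Int)) → List (List (List (String × Int)))
  | [] => []
  | x :: rest =>
      let j := 1 + pvRunLen x rest
      ((x :: rest).take j) :: split_array_by_shotclock_alt ((x :: rest).drop j)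
  termination_by xs => xs.length
  decreasing_by simp

-- ===== PRECONDITION & SPEC =====
def Spec_split_array_by_shotclock (json_array : List (List (String × Int))) (out : List (List (List (String × Int)))) : Prop := out = split_array_by_shotclock_alt json_array
instance (json_array : List (List (String × Int))) (out : List (List (List (String × Int)))) : Decidable (Spec_split_array_by_shotclock json_array out) := by unfold Spec_split_array_by_shotclock; infer_instance

-- ===== CLAIM (what is proved, stated in full; the proofs are below) =====
def Claim_equal_split_array_by_shotclock : Prop := ∀ (json_array : List (List (String × Int))), Dom_split_array_by_shotclock json_array → Spec_split_array_by_shotclock json_array (split_array_by_shotclock json_array)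

-- ===== LEMMAS AND PROOFS =====

-- the final 'if current_subarray: result.append(current_subarray)' flush of A
def pvFlush (st : List (List (List (String × Int))) × List (List (String × Int))) : List (List (List (String × Int))) :=
  if st.2 ≠ [] then st.1 ++ [st.2] else st.1

-- abstract description of A's loop from a state (cur ≠ []) with previous element prev
def pvConsume : List (String × Int) → List (List (String × Int)) → List (List (String × Int)) → List (List (List (String × Int)))
  | _, cur, [] => [cur]
  | prev, cur, x :: xs =>
      if pvSc x > pvSc prev then cur :: pvConsume x [x] xs else pvConsume x (cur ++ [x]) xs

lemma pvConsume_eq (xs : List (List (String × Int))) :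
    ∀ (prev : List (String × Int)) (cur : List (List (String × Int))),
      pvConsume prev cur xs =
        (cur ++ xs.take (pvRunLen prev xs)) :: split_array_by_shotclock_alt (xs.drop (pvRunLen prev xs)) := by
  induction xs with
  | nil => intro prev cur; simp [pvConsume, pvRunLen, split_array_by_shotclock_alt.eq_def]
  | cons x xs ih =>
    intro prev cur
    by_cases h : pvSc x ≤ pvSc prev
    · have hng : ¬ pvSc x > pvSc prev := by omega
      simp only [pvConsume, if_neg hng, pvRunLen, if_pos h, ih x (cur ++ [x])]
      have h1 : 1 + pvRunLen x xs = pvRunLen x xs + 1 := by omega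
      simp [h1]
    · have hg : pvSc x > pvSc prev := by omega
      simp only [pvConsume, if_pos hg, pvRunLen, if_neg h]
      rw [ih x [x]]
      simp only [List.take_zero, List.drop_zero, List.append_nil]
      rw [split_array_by_shotclock_alt]
      have h1 : 1 + pvRunLen x xs = pvRunLen x xs + 1 := by omega
      simp [h1]

lemma splitLoopA_eq (ja : List (List (String × Int))) :
    ∀ (xs : List (List (String × Int))) (i : Nat)
      (res : List (List (List (String × Int)))) (cur : List (List (String × Int)))
      (prev : List (String × Int)),
      cur ≠ [] → 1 ≤ i →
      PySem.List.pyGet? ja ((i : Int) - 1) = some prev →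
      ja.drop i = xs →
      pvFlush (splitLoopA ja i xs (res, cur)) = res ++ pvConsume prev cur xs := by
  intro xs
  induction xs with
  | nil => intro i res cur prev hcur _ _ _; simp [splitLoopA, pvFlush, pvConsume, hcur]
  | cons x xs ih =>
    intro i res cur prev hcur hi hget hdrop
    have hx : ja[i]? = some x := by
      have h0 : (ja.drop i)[0]? = ja[i + 0]? := List.getElem?_drop
      rw [hdrop] at h0
      simpa using h0.symm
    have hget' : PySem.List.pyGet? ja (((i + 1 : Nat) : Int) - 1) = some x := by
      have he : (((i + 1 : Nat) : Int) - 1) = ((i : Nat) : Int) := by push_cast; ring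
      rw [he, PySem.List.pyGet?_natCast]; exact hx
    have hdrop' : ja.drop (i + 1) = xs := by
      have he : ja.drop (i + 1) = (ja.drop i).drop 1 := by rw [← List.drop_drop]
      simp [he, hdrop]
    have hprev : (PySem.List.pyGet? ja ((i : Int) - 1)).getD [] = prev := by simp [hget]
    simp only [splitLoopA, hprev]
    by_cases hc : pvSc x > pvSc prev
    · rw [if_pos ⟨by omega, hc⟩, if_pos hcur,
        ih (i + 1) (res ++ [cur]) [x] x (by simp) (by omega) hget' hdrop']
      simp [pvConsume, hc]
    · rw [if_neg (fun h => hc h.2),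
        ih (i + 1) res (cur ++ [x]) x (by simp) (by omega) hget' hdrop']
      simp [pvConsume, hc]

-- ===== VERDICT (by name: the statement is the Claim_ definition above) =====
theorem split_array_by_shotclock_spec : Claim_equal_split_array_by_shotclock := by
  intro ja _
  unfold Spec_split_array_by_shotclock
  show pvFlush (splitLoopA ja 0 ja ([], [])) = split_array_by_shotclock_alt ja
  cases ja with
  | nil => rw [split_array_by_shotclock_alt]; simp [splitLoopA, pvFlush]
  | cons x rest =>
    have h0 : splitLoopA (x :: rest) 0 (x :: rest) ([], []) =
        splitLoopA (x :: rest) 1 rest ([], [x]) := by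
      simp [splitLoopA]
    have hget : PySem.List.pyGet? (x :: rest) ((1 : Int) - 1) = some x := by
      norm_num [PySem.List.pyGet?_zero_cons]
    rw [h0, splitLoopA_eq (x :: rest) rest 1 [] [x] x (by simp) (by omega) hget (by simp),
      pvConsume_eq, split_array_by_shotclock_alt]
    have h1 : 1 + pvRunLen x rest = pvRunLen x rest + 1 := by omega
    simp [h1]
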